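-- pv_equiv track=rewrite | github.com/YuSec2021/material-platform | scripts/orchestrate.py | _has_multi_paragraph_narrative
-- ===== SOURCE A (Python) =====
-- def _has_multi_paragraph_narrative(lines: list[str]) -> bool:
--     """Detect multi-paragraph narrative: 3+ consecutive non-empty lines separated by blank lines."""
--     paragraphs = 0
--     in_paragraph = False
--     for line in lines:
--         if line.strip():
--             if not in_paragraph:
--                 paragraphs += 1
--                 in_paragraph = True
--         else:
--             in_paragraph = False
--     return paragraphs > 6
-- ===== SOURCE B (Python) =====
-- def _has_multi_paragraph_narrative(lines: list[str]) -> bool: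
--     """Inclusion-exclusion: each maximal run of k non-blank lines has k lines and
--     k-1 adjacent non-blank pairs, so #runs = #non-blank lines - #adjacent pairs."""
--     keys = [bool(line.strip()) for line in lines]
--     paragraphs = keys.count(True) - sum(a and b for a, b in zip(keys, keys[1:]))
--     return paragraphs > 6
-- ===== Notes on version B (the rewrite author's own statement) =====
-- stated objective: alternative
-- what changed: Replaces A's stateful scan with an in_paragraph flag by a stateless inclusion-exclusion: paragraphs = (count of non-blank lines) - (count of adjacent non-blank pairs from zipping the key list with its tail).
import Mathlib
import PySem

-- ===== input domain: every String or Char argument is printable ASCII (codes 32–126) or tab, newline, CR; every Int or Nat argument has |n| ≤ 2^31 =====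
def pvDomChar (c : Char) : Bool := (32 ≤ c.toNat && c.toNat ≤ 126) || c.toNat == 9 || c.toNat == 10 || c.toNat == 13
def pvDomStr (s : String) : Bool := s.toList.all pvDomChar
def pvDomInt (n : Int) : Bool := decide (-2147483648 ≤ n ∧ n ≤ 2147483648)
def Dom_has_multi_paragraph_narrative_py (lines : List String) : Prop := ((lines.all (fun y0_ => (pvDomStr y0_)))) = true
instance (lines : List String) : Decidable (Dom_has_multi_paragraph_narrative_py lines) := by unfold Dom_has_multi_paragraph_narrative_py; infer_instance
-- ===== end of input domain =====

-- B replaces A's stateful flag-scan by stateless inclusion-exclusion: paragraphs = #non-blank lines - #adjacent non-blank pairs (alternative decomposition; same cost).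


-- ===== PORT A =====
-- state: (paragraphs, in_paragraph); A's loop as a foldl over the same state
def pvStepA (s : Nat × Bool) (line : String) : Nat × Bool :=
  if PySem.Str.strip line ≠ "" then
    if !s.2 then (s.1 + 1, true) else (s.1, true)
  else (s.1, false)

def has_multi_paragraph_narrative_py (lines : List String) : Bool :=
  decide ((lines.foldl pvStepA (0, false)).1 > 6)

-- ===== PORT B =====
-- keys = [bool(line.strip()) for line in lines];
-- paragraphs = keys.count(True) - sum(a and b for a, b in zip(keys, keys[1:]))
def has_multi_paragraph_narrative_py_alt (lines : List String) : Bool :=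
  let keys := lines.map (fun line => decide (PySem.Str.strip line ≠ ""))
  let paragraphs : Int :=
    (keys.count true : Int) - ((keys.zip (keys.drop 1)).countP (fun p => p.1 && p.2) : Int)
  decide (paragraphs > 6)

-- ===== PRECONDITION & SPEC =====
def Spec_has_multi_paragraph_narrative_py (lines : List String) (out : Bool) : Prop := out = has_multi_paragraph_narrative_py_alt lines
instance (lines : List String) (out : Bool) : Decidable (Spec_has_multi_paragraph_narrative_py lines out) := by unfold Spec_has_multi_paragraph_narrative_py; infer_instance

-- ===== CLAIM (what is proved, stated in full; the proofs are below) =====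
def Claim_equal_has_multi_paragraph_narrative_py : Prop := ∀ (lines : List String), Dom_has_multi_paragraph_narrative_py lines → Spec_has_multi_paragraph_narrative_py lines (has_multi_paragraph_narrative_py lines)

-- ===== LEMMAS AND PROOFS =====

-- number of adjacent true-true pairs in (prev :: ks)
def pvAdjAux (prev : Bool) : List Bool → Nat
  | [] => 0
  | k :: ks => (if prev && k then 1 else 0) + pvAdjAux k ks

theorem pv_fold_inv (lines : List String) (p : Nat) (b : Bool) :
    (lines.foldl pvStepA (p, b)).1
      + pvAdjAux b (lines.map (fun line => decide (PySem.Str.strip line ≠ ""))) =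
    p + (lines.map (fun line => decide (PySem.Str.strip line ≠ ""))).count true := by
  induction lines generalizing p b with
  | nil => simp [pvAdjAux]
  | cons l ls ih =>
    rw [List.foldl_cons]
    by_cases h : PySem.Str.strip l = ""
    · have hk : decide (PySem.Str.strip l ≠ "") = false := by simp [h]
      have hs : pvStepA (p, b) l = (p, false) := by simp [pvStepA, h]
      rw [hs, List.map_cons, hk, List.count_cons]
      have hadj : pvAdjAux b (false :: ls.map (fun line => decide (PySem.Str.strip line ≠ ""))) =
          pvAdjAux false (ls.map (fun line => decide (PySem.Str.strip line ≠ ""))) := by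
        cases b <;> simp [pvAdjAux]
      rw [hadj, if_neg (by simp)]
      have := ih p false
      omega
    · have hk : decide (PySem.Str.strip l ≠ "") = true := by simp [h]
      cases b
      · have hs : pvStepA (p, false) l = (p + 1, true) := by simp [pvStepA, h]
        rw [hs, List.map_cons, hk, List.count_cons]
        have hadj : pvAdjAux false (true :: ls.map (fun line => decide (PySem.Str.strip line ≠ ""))) =
            pvAdjAux true (ls.map (fun line => decide (PySem.Str.strip line ≠ ""))) := by
          simp [pvAdjAux]
        rw [hadj, if_pos (by simp)]
        have := ih (p + 1) true
        omega
      · have hs : pvStepA (p, true) l = (p, true) := by simp [pvStepA, h]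
        rw [hs, List.map_cons, hk, List.count_cons]
        have hadj : pvAdjAux true (true :: ls.map (fun line => decide (PySem.Str.strip line ≠ ""))) =
            1 + pvAdjAux true (ls.map (fun line => decide (PySem.Str.strip line ≠ ""))) := by
          simp [pvAdjAux]
        rw [hadj, if_pos (by simp)]
        have := ih p true
        omega

-- the zip-with-tail pair count equals pvAdjAux from a false seed
theorem pv_zip_adj (ks : List Bool) :
    (ks.zip (ks.drop 1)).countP (fun p => p.1 && p.2) = pvAdjAux false ks := by
  have key : ∀ (k : Bool) (ks : List Bool),
      ((k :: ks).zip ks).countP (fun p => p.1 && p.2) = pvAdjAux k ks := by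
    intro k ks
    induction ks generalizing k with
    | nil => simp [pvAdjAux]
    | cons k' ks ih =>
      simp only [List.zip_cons_cons, List.countP_cons, pvAdjAux, ih k']
      by_cases h : (k && k') = true
      · simp [h]; omega
      · simp [h]
  cases ks with
  | nil => simp [pvAdjAux]
  | cons k ks =>
    have : pvAdjAux false (k :: ks) = pvAdjAux k ks := by simp [pvAdjAux]
    rw [this, List.drop_one, List.tail_cons, key]

-- ===== VERDICT (by name: the statement is the Claim_ definition above) =====
theorem has_multi_paragraph_narrative_py_spec : Claim_equal_has_multi_paragraph_narrative_py := by
  intro lines _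
  unfold Spec_has_multi_paragraph_narrative_py has_multi_paragraph_narrative_py
    has_multi_paragraph_narrative_py_alt
  have h1 := pv_fold_inv lines 0 false
  have h2 := pv_zip_adj (lines.map (fun line => decide (PySem.Str.strip line ≠ "")))
  simp only [h2]
  simp only [decide_eq_decide]
  omega
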